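-- pv_equiv track=rewrite | github.com/bcgsc/rnaseq_utils | scripts/gtf_feature_lengths.py | get_tid_gid_from_attribute_col
-- ===== SOURCE A (Python) =====
-- def get_tid_gid_from_attribute_col(col):
--     tid = None
--     gid = None
--     for info in col.split(';'):
--         key, val = info.strip().split()
--         if key == 'transcript_id':
--             tid = val.strip('"')
--         elif key == 'gene_id':
--             gid = val.strip('"')
--     return tid, gid
-- ===== SOURCE B (Python) =====
-- def _find_last(fields, key):
--     # first match while scanning the fields back-to-front = last occurrence
--     for info in reversed(fields):
--         k, v = info.strip().split()
--         if k == key: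
--             return v.strip('"')
--     return None
--
--
-- def get_tid_gid_from_attribute_col(col):
--     fields = col.split(';')
--     return _find_last(fields, 'transcript_id'), _find_last(fields, 'gene_id')
-- ===== Notes on version B (the rewrite author's own statement) =====
-- stated objective: alternative
-- what changed: Replaces A's single forward fold with two in-loop conditional accumulators by two independent backward searches per key that return at the first match (last occurrence), with no accumulator state.
import Mathlib
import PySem

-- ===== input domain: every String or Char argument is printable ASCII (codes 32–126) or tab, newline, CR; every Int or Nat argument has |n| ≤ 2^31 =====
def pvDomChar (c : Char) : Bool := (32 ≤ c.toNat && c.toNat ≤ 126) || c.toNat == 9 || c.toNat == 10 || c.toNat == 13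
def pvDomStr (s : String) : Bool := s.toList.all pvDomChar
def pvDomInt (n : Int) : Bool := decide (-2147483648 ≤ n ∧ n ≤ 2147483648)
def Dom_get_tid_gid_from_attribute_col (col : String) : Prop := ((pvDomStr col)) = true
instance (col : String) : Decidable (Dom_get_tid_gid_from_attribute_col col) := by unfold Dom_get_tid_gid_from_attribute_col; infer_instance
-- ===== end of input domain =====

-- B replaces A's single forward fold over two accumulators with two independent
-- backward per-key searches returning at the first match (alternative decomposition).


-- ===== PORT A =====
def get_tid_gid_from_attribute_col (col : String) : Option String × Option String :=
  ((PySem.Str.split? col ";").getD []).foldl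
    (fun (st : Option String × Option String) info =>
      match PySem.Str.split₀ (PySem.Str.strip info) with
      | [key, val] =>
        if key = "transcript_id" then (some (PySem.Str.stripChars val "\""), st.2)
        else if key = "gene_id" then (st.1, some (PySem.Str.stripChars val "\""))
        else st
      | _ => st)  -- Python raises ValueError here; excluded by Pre_
    (none, none)

-- ===== PORT B =====
-- B's helper _find_last: scan fields back-to-front, return the first match
def pvFindLast (fields : List String) (key : String) : Option String :=
  match fields with
  | [] => none
  | info :: rest =>
    let ws := PySem.Str.split₀ (PySem.Str.strip info)
    if ws.length = 2 then  -- the `k, v = …` unpacking; Python raises ValueError otherwise (excluded by Pre_)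
      if ws.headD "" = key then some (PySem.Str.stripChars (ws.tail.headD "") "\"")
      else pvFindLast rest key
    else pvFindLast rest key

def get_tid_gid_from_attribute_col_alt (col : String) : Option String × Option String :=
  let fields := ((PySem.Str.split? col ";").getD []).reverse  -- reversed(fields) iteration
  (pvFindLast fields "transcript_id", pvFindLast fields "gene_id")

-- ===== PRECONDITION & SPEC =====
-- Pre_: every semicolon-separated field must split (on whitespace) into exactly two tokens;
-- otherwise the tuple unpacking of the whitespace split raises ValueError in A (and in B).
def Pre_get_tid_gid_from_attribute_col (col : String) : Prop :=
  ∀ info ∈ (PySem.Str.split? col ";").getD [], (PySem.Str.split₀ (PySem.Str.strip info)).length = 2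
instance (col : String) : Decidable (Pre_get_tid_gid_from_attribute_col col) := by
  unfold Pre_get_tid_gid_from_attribute_col; infer_instance

def pvWitness_get_tid_gid_from_attribute_col : String :=
  "transcript_id \"t1\"; gene_id \"g1\""

def Spec_get_tid_gid_from_attribute_col (col : String) (out : Option String × Option String) : Prop := out = get_tid_gid_from_attribute_col_alt col
instance (col : String) (out : Option String × Option String) : Decidable (Spec_get_tid_gid_from_attribute_col col out) := by unfold Spec_get_tid_gid_from_attribute_col; infer_instance

-- ===== CLAIM (what is proved, stated in full; the proofs are below) =====
def Claim_equal_get_tid_gid_from_attribute_col : Prop := ∀ (col : String), Dom_get_tid_gid_from_attribute_col col → Pre_get_tid_gid_from_attribute_col col → Spec_get_tid_gid_from_attribute_col col (get_tid_gid_from_attribute_col col)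

-- ===== LEMMAS AND PROOFS =====

-- A's loop body, named for the lemmas
def pvStepA (st : Option String × Option String) (info : String) : Option String × Option String :=
  match PySem.Str.split₀ (PySem.Str.strip info) with
  | [key, val] =>
    if key = "transcript_id" then (some (PySem.Str.stripChars val "\""), st.2)
    else if key = "gene_id" then (st.1, some (PySem.Str.stripChars val "\""))
    else st
  | _ => st

lemma pvFindLast_append (xs ys : List String) (key : String) :
    pvFindLast (xs ++ ys) key = (pvFindLast xs key).or (pvFindLast ys key) := by
  induction xs with
  | nil => simp [pvFindLast]
  | cons info rest ih =>
    simp only [List.cons_append, pvFindLast]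
    cases h : PySem.Str.split₀ (PySem.Str.strip info) with
    | nil => simp [ih]
    | cons k t =>
      cases t with
      | nil => simp [ih]
      | cons v t2 =>
        cases t2 with
        | nil =>
          by_cases hk : k = key
          · simp [hk]
          · simp [hk, ih]
        | cons _ _ => simp [ih]

-- A's step on one field equals B's one-field backward search with fallback to the state
lemma pvStep_eq (st : Option String × Option String) (info : String) :
    pvStepA st info =
      ((pvFindLast [info] "transcript_id").or st.1,
       (pvFindLast [info] "gene_id").or st.2) := by
  unfold pvStepA pvFindLast
  cases h : PySem.Str.split₀ (PySem.Str.strip info) with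
  | nil => simp [pvFindLast]
  | cons k t =>
    cases t with
    | nil => simp [pvFindLast]
    | cons v t2 =>
      cases t2 with
      | nil =>
        by_cases h1 : k = "transcript_id"
        · subst h1; simp [pvFindLast]
        · by_cases h2 : k = "gene_id" <;> simp [h1, h2, pvFindLast]
      | cons _ _ => simp [pvFindLast]

-- invariant of A's fold: each component is B's backward search over the reversed
-- prefix, falling back to the incoming state
lemma pvFold_findLast (l : List String) (st : Option String × Option String) :
    l.foldl pvStepA st =
      ((pvFindLast l.reverse "transcript_id").or st.1,
       (pvFindLast l.reverse "gene_id").or st.2) := by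
  induction l generalizing st with
  | nil => simp [pvFindLast]
  | cons info rest ih =>
    rw [List.foldl_cons, ih, pvStep_eq]
    have hrev : (info :: rest).reverse = rest.reverse ++ [info] := by simp
    rw [hrev, pvFindLast_append, pvFindLast_append, Option.or_assoc, Option.or_assoc]

-- ===== VERDICT (by name: the statement is the Claim_ definition above) =====
theorem get_tid_gid_from_attribute_col_spec : Claim_equal_get_tid_gid_from_attribute_col := by
  intro col _ _
  unfold Spec_get_tid_gid_from_attribute_col get_tid_gid_from_attribute_col get_tid_gid_from_attribute_col_alt
  rw [show (fun (st : Option String × Option String) info =>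
      match PySem.Str.split₀ (PySem.Str.strip info) with
      | [key, val] =>
        if key = "transcript_id" then (some (PySem.Str.stripChars val "\""), st.2)
        else if key = "gene_id" then (st.1, some (PySem.Str.stripChars val "\""))
        else st
      | _ => st) = pvStepA from rfl]
  rw [pvFold_findLast]
  simp
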